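-- pv_equiv track=rewrite | github.com/Saniyanaaz11/IS | Ex1/playfair.py | clean_decrypted
-- ===== SOURCE A (Python) =====
-- def clean_decrypted(text):
--     cleaned, i = [], 0
--     while i < len(text)-2:
--         a, b, c = text[i], text[i+1], text[i+2]
--         if b == 'x' and a == c:
--             cleaned.append(a); i += 2
--         else:
--             cleaned.append(a); i += 1
--     cleaned.extend(text[i:])
--     return ''.join(cleaned).rstrip('x')
-- ===== SOURCE B (Python) =====
-- import re
--
-- _PAD = re.compile(r'(.)x(?=\1)', re.DOTALL)
--
-- def clean_decrypted(text):
--     # One regex substitution: consume "<c>x" when the lookahead sees <c> again,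
--     # then strip trailing padding.
--     return _PAD.sub(r'\1', text).rstrip('x')
-- ===== Notes on version B (the rewrite author's own statement) =====
-- stated objective: idiomatic
-- what changed: B replaces A's manual index-jumping while loop (read a triple, append, step by 1 or 2, extend the tail) with a single regex substitution whose pattern captures a character, consumes a following padding x, and uses a lookahead to require the captured character again, then strips trailing padding.
import Mathlib
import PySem

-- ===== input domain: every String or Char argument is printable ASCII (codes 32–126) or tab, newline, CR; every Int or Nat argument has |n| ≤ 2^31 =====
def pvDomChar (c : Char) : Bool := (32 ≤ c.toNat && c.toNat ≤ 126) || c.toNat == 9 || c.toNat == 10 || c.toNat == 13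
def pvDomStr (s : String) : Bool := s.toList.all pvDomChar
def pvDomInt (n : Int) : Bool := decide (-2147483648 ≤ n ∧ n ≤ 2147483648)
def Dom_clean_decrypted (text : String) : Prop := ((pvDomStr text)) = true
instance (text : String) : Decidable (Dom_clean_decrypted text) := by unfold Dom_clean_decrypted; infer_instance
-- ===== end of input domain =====

-- B replaces A's index-jumping while loop by a single regex substitution
-- re.sub(r'(.)x(?=\1)', r'\1', text, DOTALL).rstrip('x') (objective: idiomatic).

-- exact port of .rstrip('x'): drop trailing 'x' characters
def rstripX (cs : List Char) : List Char :=
  (cs.reverse.dropWhile (fun c => c = 'x')).reverse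

-- ===== PORT A =====
-- A's while loop over index i with accesses text[i], text[i+1], text[i+2] and
-- steps of 1 or 2, followed by cleaned.extend(text[i:]), transliterated as the
-- structural recursion over the suffix text[i:] (the loop's entire state).
def cleanA : List Char → List Char
  | a :: b :: c :: rest =>
      if b = 'x' ∧ a = c then a :: cleanA (c :: rest)
      else a :: cleanA (b :: c :: rest)
  | s => s   -- i ≥ len(text)-2: cleaned.extend(text[i:])

def clean_decrypted (text : String) : String :=
  String.ofList (rstripX (cleanA text.toList))

-- ===== PORT B =====
-- Hand-port of Source B's regex engine for the fixed pattern r'(.)x(?=\1)' with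
-- DOTALL: try a match at the current position; on success emit the replacement
-- '\1' and resume after the CONSUMED text (the lookahead consumes nothing),
-- otherwise emit the current character and advance one position.  Exact for
-- this pattern: '.' matches any character under DOTALL.
def padMatch (cs : List Char) : Option (Char × List Char) :=
  match cs with
  | g :: x :: la :: rest =>
      -- group (.) = g, literal 'x', lookahead (?=\1): next char equals g
      if x = 'x' ∧ la = g then some (g, la :: rest) else none
  | _ => none   -- fewer than 3 chars left: the lookahead cannot succeed

-- termination of Source B's sub loop: a match always consumes at least one char
theorem padMatch_lt {cs : List Char} {r : Char} {cont : List Char}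
    (h : padMatch cs = some (r, cont)) : cont.length < cs.length := by
  rcases cs with _ | ⟨g, _ | ⟨x, _ | ⟨la, rest⟩⟩⟩ <;> simp [padMatch] at h
  rcases h with ⟨hc, -, hcont⟩
  subst hcont; simp

def reSubPad : List Char → List Char
  | [] => []
  | c :: rest =>
      match h : padMatch (c :: rest) with
      | some (rep, cont) => rep :: reSubPad cont
      | none => c :: reSubPad rest
termination_by cs => cs.length
decreasing_by
  · exact padMatch_lt h
  · simp

def clean_decrypted_alt (text : String) : String :=
  String.ofList (rstripX (reSubPad text.toList))

-- ===== PRECONDITION & SPEC =====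
def Spec_clean_decrypted (text : String) (out : String) : Prop := out = clean_decrypted_alt text
instance (text : String) (out : String) : Decidable (Spec_clean_decrypted text out) := by unfold Spec_clean_decrypted; infer_instance

-- ===== CLAIM (what is proved, stated in full; the proofs are below) =====
def Claim_equal_clean_decrypted : Prop := ∀ (text : String), Dom_clean_decrypted text → Spec_clean_decrypted text (clean_decrypted text)

-- ===== LEMMAS AND PROOFS =====
theorem reSubPad_eq_cleanA (cs : List Char) : reSubPad cs = cleanA cs := by
  induction cs using cleanA.induct with
  | case1 a b c rest hcond ih =>
      rw [cleanA, if_pos hcond, reSubPad]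
      have : padMatch (a :: b :: c :: rest) = some (a, c :: rest) := by
        simp [padMatch, hcond.1, hcond.2.symm]
      rw [reSubPad]
      split
      next rep cont h' =>
        rw [this] at h'
        injection h' with h''
        injection h'' with h1 h2
        subst h1; subst h2; rw [ih]
      next h' => rw [this] at h'; cases h'
  | case2 a b c rest hcond ih =>
      rw [cleanA, if_neg hcond, reSubPad]
      have : padMatch (a :: b :: c :: rest) = none := by
        by_cases hb : b = 'x'
        · have hac : ¬ c = a := fun h => hcond ⟨hb, h.symm⟩
          simp [padMatch, hac]
        · simp [padMatch, hb]
      rw [reSubPad]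
      split
      next rep cont h' => rw [this] at h'; cases h'
      next h' => rw [← reSubPad, ih]
  | case3 s h =>
      rcases s with _ | ⟨a, _ | ⟨b, _ | ⟨c, r⟩⟩⟩
      · simp [cleanA, reSubPad]
      · simp [cleanA, reSubPad, padMatch]
      · simp [cleanA, reSubPad, padMatch]
      · exact absurd rfl (h a b c r)

-- ===== VERDICT (by name: the statement is the Claim_ definition above) =====
theorem clean_decrypted_spec : Claim_equal_clean_decrypted := by
  intro text _
  unfold Spec_clean_decrypted clean_decrypted clean_decrypted_alt
  rw [reSubPad_eq_cleanA]
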